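-- pv_equiv track=rewrite | github.com/freitaszc/ponza-health | prescription.py | _has_unit_suffix
-- ===== SOURCE A (Python) =====
-- def _has_unit_suffix(text: str, end: int) -> bool:
--     unit_segment_raw = text[end:end + 20]
--     unit_segment = unit_segment_raw.lower()
--     percent_pos = unit_segment.find('%')
--     units = ['mg/dl', 'g/dl', 'ng/ml', 'pg', 'fl', 'mm³', 'mm3', '/mm', 'µui', 'ui/ml', 'u/ml', 'u/l',
--              'mmol', 'meq', 'mcg', 'ng/dl', 'g/l', 'mg/l', 'mm/h', 'µg']
--     for unit in units:
--         pos = unit_segment.find(unit)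
--         if pos == -1:
--             continue
--         if percent_pos != -1 and percent_pos < pos:
--             continue
--         if pos <= 6:
--             return True
--     return False
-- ===== SOURCE B (Python) =====
-- def _has_unit_suffix(text: str, end: int) -> bool:
--     segment = text[end:end + 20].lower()
--     percent_pos = segment.find('%')
--     units = ['mg/dl', 'g/dl', 'ng/ml', 'pg', 'fl', 'mm³', 'mm3', '/mm', 'µui', 'ui/ml', 'u/ml', 'u/l',
--              'mmol', 'meq', 'mcg', 'ng/dl', 'g/l', 'mg/l', 'mm/h', 'µg']
--     for p in range(min(7, len(segment))):
--         if percent_pos != -1 and percent_pos < p: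
--             break
--         tail = segment[p:]
--         if any(tail.startswith(unit) for unit in units):
--             return True
--     return False
-- ===== Notes on version B (the rewrite author's own statement) =====
-- stated objective: alternative
-- what changed: Transposes the loop nesting: instead of computing each unit's first occurrence with find and testing pos<=6 against percent_pos, B walks the start positions 0..6, breaks once the '%' sits before the position, and tests every unit as a prefix of segment[p:] there.
import Mathlib
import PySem

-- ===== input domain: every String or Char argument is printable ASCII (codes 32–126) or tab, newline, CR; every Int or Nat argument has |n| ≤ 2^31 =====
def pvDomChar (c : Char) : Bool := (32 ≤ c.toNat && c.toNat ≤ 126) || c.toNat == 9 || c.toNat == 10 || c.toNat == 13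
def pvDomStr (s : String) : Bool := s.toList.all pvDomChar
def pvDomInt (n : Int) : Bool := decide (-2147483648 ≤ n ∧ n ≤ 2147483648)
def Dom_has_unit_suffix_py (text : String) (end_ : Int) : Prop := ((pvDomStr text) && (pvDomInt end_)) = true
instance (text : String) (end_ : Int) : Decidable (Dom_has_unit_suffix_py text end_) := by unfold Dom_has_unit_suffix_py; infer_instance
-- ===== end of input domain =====

-- B transposes A's loop: instead of scanning each unit for its first occurrence, it walks the
-- candidate start positions 0..6 and tests every unit as a prefix there (objective: alternative
-- decomposition, same asymptotic cost).

-- ===== PORT A =====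
def pvUnitsA : List (List Char) :=
  ["mg/dl".toList, "g/dl".toList, "ng/ml".toList, "pg".toList, "fl".toList, "mm³".toList,
   "mm3".toList, "/mm".toList, "µui".toList, "ui/ml".toList, "u/ml".toList, "u/l".toList,
   "mmol".toList, "meq".toList, "mcg".toList, "ng/dl".toList, "g/l".toList, "mg/l".toList,
   "mm/h".toList, "µg".toList]

-- A's for-loop over the units, with its three continue/return branches in order
def pvGoA (seg : List Char) (ppos : Int) : List (List Char) → Bool
  | [] => false
  | u :: rest =>
    let pos := PySem.Chars.find seg u
    if pos = -1 then pvGoA seg ppos rest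
    else if ppos ≠ -1 ∧ ppos < pos then pvGoA seg ppos rest
    else if pos ≤ 6 then true
    else pvGoA seg ppos rest

def has_unit_suffix_py (text : String) (end_ : Int) : Bool :=
  let unit_segment := PySem.Chars.lower (PySem.Chars.slice text.toList (some end_) (some (end_ + 20)))
  let percent_pos := PySem.Chars.find unit_segment ['%']
  pvGoA unit_segment percent_pos pvUnitsA

-- ===== PORT B ===== (shares the pvUnitsA literal: both sources carry the identical units list)
-- B's for-loop over the start positions, with the break and the any(...) prefix test
def pvGoB (seg : List Char) (ppos : Int) : List Int → Bool
  | [] => false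
  | p :: rest =>
    if ppos ≠ -1 ∧ ppos < p then false
    else if pvUnitsA.any (fun u => PySem.Chars.startswith (PySem.Chars.slice seg (some p) none) u) then true
    else pvGoB seg ppos rest

def has_unit_suffix_py_alt (text : String) (end_ : Int) : Bool :=
  let segment := PySem.Chars.lower (PySem.Chars.slice text.toList (some end_) (some (end_ + 20)))
  let percent_pos := PySem.Chars.find segment ['%']
  pvGoB segment percent_pos (PySem.List.pyRange 0 (min 7 (PySem.Chars.len segment)) 1)

-- ===== PRECONDITION & SPEC =====
def Spec_has_unit_suffix_py (text : String) (end_ : Int) (out : Bool) : Prop := out = has_unit_suffix_py_alt text end_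
instance (text : String) (end_ : Int) (out : Bool) : Decidable (Spec_has_unit_suffix_py text end_ out) := by unfold Spec_has_unit_suffix_py; infer_instance

-- ===== CLAIM (what is proved, stated in full; the proofs are below) =====
def Claim_equal_has_unit_suffix_py : Prop := ∀ (text : String) (end_ : Int), Dom_has_unit_suffix_py text end_ → Spec_has_unit_suffix_py text end_ (has_unit_suffix_py text end_)

-- ===== LEMMAS AND PROOFS =====

theorem pvUnitsA_ne_nil : ∀ u ∈ pvUnitsA, u ≠ [] := by decide

-- A's loop returns true iff some unit passes all three tests
theorem pvGoA_iff (seg : List Char) (ppos : Int) (us : List (List Char)) :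
    pvGoA seg ppos us = true ↔
      ∃ u ∈ us, PySem.Chars.find seg u ≠ -1 ∧
        ¬(ppos ≠ -1 ∧ ppos < PySem.Chars.find seg u) ∧ PySem.Chars.find seg u ≤ 6 := by
  induction us with
  | nil => simp [pvGoA]
  | cons u rest ih =>
    simp only [pvGoA]
    split_ifs with h1 h2 h3
    · simp [ih, h1]
    · constructor
      · intro h; rcases ih.mp h with ⟨v, hv, hs⟩; exact ⟨v, List.mem_cons_of_mem _ hv, hs⟩
      · rintro ⟨v, hv, hf, hc, h6⟩
        rcases List.mem_cons.mp hv with rfl | hv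
        · exact absurd h2 hc
        · exact ih.mpr ⟨v, hv, hf, hc, h6⟩
    · simp only [true_iff]; exact ⟨u, List.mem_cons_self, h1, h2, h3⟩
    · constructor
      · intro h; rcases ih.mp h with ⟨v, hv, hs⟩; exact ⟨v, List.mem_cons_of_mem _ hv, hs⟩
      · rintro ⟨v, hv, hf, hc, h6⟩
        rcases List.mem_cons.mp hv with rfl | hv
        · exact absurd h6 h3
        · exact ih.mpr ⟨v, hv, hf, hc, h6⟩

-- B's loop over a nondecreasing position list returns true iff some position passes
theorem pvGoB_iff (seg : List Char) (ppos : Int) (ps : List Int)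
    (hmono : ps.Pairwise (· ≤ ·)) :
    pvGoB seg ppos ps = true ↔
      ∃ p ∈ ps, ¬(ppos ≠ -1 ∧ ppos < p) ∧
        pvUnitsA.any (fun u => PySem.Chars.startswith (PySem.Chars.slice seg (some p) none) u) = true := by
  induction ps with
  | nil => simp [pvGoB]
  | cons p rest ih =>
    rcases List.pairwise_cons.mp hmono with ⟨hle, hrest⟩
    simp only [pvGoB]
    split_ifs with h1 h2
    · simp only [false_iff]
      rintro ⟨q, hq, hc, _⟩
      rcases List.mem_cons.mp hq with rfl | hq
      · exact hc h1
      · exact hc ⟨h1.1, lt_of_lt_of_le h1.2 (hle q hq)⟩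
    · simp only [true_iff]; exact ⟨p, List.mem_cons_self, h1, h2⟩
    · rw [ih hrest]
      constructor
      · rintro ⟨q, hq, hs⟩; exact ⟨q, List.mem_cons_of_mem _ hq, hs⟩
      · rintro ⟨q, hq, hc, hs⟩
        rcases List.mem_cons.mp hq with rfl | hq
        · exact absurd hs h2
        · exact ⟨q, hq, hc, hs⟩

theorem pvRange_pairwise (m : Int) : (PySem.List.pyRange 0 m 1).Pairwise (· ≤ ·) := by
  have h : (0 : Int) ≤ m ∨ m ≤ 0 := le_total 0 m
  rcases h with h | h
  · obtain ⟨n, rfl⟩ := Int.eq_ofNat_of_zero_le h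
    rw [PySem.List.pyRange_zero_natCast]
    exact (List.pairwise_lt_range.map _ (by intro a b hab; exact_mod_cast hab.le))
  · have : PySem.List.pyRange 0 m 1 = [] := by
      apply List.eq_nil_iff_forall_not_mem.mpr
      intro x hx
      rcases PySem.List.mem_pyRange_one.mp hx with ⟨h0, hm⟩
      omega
    simp [this]

-- the B-side any(...) test, unfolded to an existential over prefixes
theorem pvAny_iff (seg : List Char) (p : Int) (hp : 0 ≤ p) :
    pvUnitsA.any (fun u => PySem.Chars.startswith (PySem.Chars.slice seg (some p) none) u) = true ↔
      ∃ u ∈ pvUnitsA, u <+: seg.drop p.toNat := by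
  rw [List.any_eq_true]
  constructor
  · rintro ⟨u, hu, hs⟩
    refine ⟨u, hu, ?_⟩
    have := (PySem.Chars.startswith_iff _ _).mp hs
    rwa [PySem.Chars.slice_eq_listSlice, PySem.List.slice_from seg hp] at this
  · rintro ⟨u, hu, hpre⟩
    refine ⟨u, hu, (PySem.Chars.startswith_iff _ _).mpr ?_⟩
    rwa [PySem.Chars.slice_eq_listSlice, PySem.List.slice_from seg hp]

-- the core transposition: first-occurrence-per-unit ⟷ any-prefix-per-position
theorem pvMain (seg : List Char) (ppos : Int) :
    pvGoA seg ppos pvUnitsA =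
      pvGoB seg ppos (PySem.List.pyRange 0 (min 7 (PySem.Chars.len seg)) 1) := by
  have hB := pvGoB_iff seg ppos _ (pvRange_pairwise (min 7 (PySem.Chars.len seg)))
  have hA := pvGoA_iff seg ppos pvUnitsA
  apply Bool.eq_iff_iff.mpr
  rw [hA, hB]
  constructor
  · rintro ⟨u, hu, hf, hc, h6⟩
    set f := PySem.Chars.find seg u with hfdef
    have hf0 : 0 ≤ f := by have := PySem.Chars.neg_one_le_find seg u; omega
    have hspec := PySem.Chars.find_spec hf0
    have hpre : u <+: seg.drop f.toNat := hspec.1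
    have hlen : f.toNat < seg.length := by
      by_contra hge
      have : seg.drop f.toNat = [] := List.drop_eq_nil_iff.mpr (by omega)
      rw [this] at hpre
      exact pvUnitsA_ne_nil u hu (List.prefix_nil.mp hpre)
    refine ⟨f, PySem.List.mem_pyRange_one.mpr ⟨hf0, ?_⟩, hc, (pvAny_iff seg f hf0).mpr ⟨u, hu, hpre⟩⟩
    rw [PySem.Chars.len_eq]
    omega
  · rintro ⟨p, hp, hc, hany⟩
    rcases PySem.List.mem_pyRange_one.mp hp with ⟨hp0, hplt⟩
    rw [PySem.Chars.len_eq] at hplt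
    rcases (pvAny_iff seg p hp0).mp hany with ⟨u, hu, hpre⟩
    set f := PySem.Chars.find seg u with hfdef
    have hinf : u <:+: seg := hpre.isInfix.trans (List.drop_suffix p.toNat seg).isInfix
    have hf0 : 0 ≤ f := (PySem.Chars.find_nonneg_iff seg u).mpr hinf
    have hspec := PySem.Chars.find_spec hf0
    have hle : f.toNat ≤ p.toNat := by
      by_contra hgt
      exact hspec.2 p.toNat (by omega) hpre
    have hfp : f ≤ p := by omega
    refine ⟨u, hu, by omega, ?_, by omega⟩
    rintro ⟨hne, hlt⟩
    exact hc ⟨hne, by omega⟩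

-- ===== VERDICT (by name: the statement is the Claim_ definition above) =====
theorem has_unit_suffix_py_spec : Claim_equal_has_unit_suffix_py := by
  intro text end_ _
  unfold Spec_has_unit_suffix_py has_unit_suffix_py has_unit_suffix_py_alt
  exact pvMain _ _
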